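-- pv_equiv track=rewrite | github.com/alan-sultan/MyLeetCodes | 2210-find-target-indices-after-sorting-array/find-target-indices-after-sorting-array.py | targetIndices
-- ===== SOURCE A (Python) =====
-- from typing import List
--
-- def targetIndices(nums: List[int], target: int) -> List[int]:
--     index = 0
--     ii = 0
--     for i in range(len(nums)):
--         if nums[i] < target:
--             index += 1
--         elif nums[i] == target:
--             ii += 1
--     return [i for i in range(index, index + ii)]
-- ===== SOURCE B (Python) =====
-- def targetIndices(nums, target):
--     s = sorted(nums)
--     return [i for i, v in enumerate(s) if v == target]
-- ===== Notes on version B (the rewrite author's own statement) =====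
-- stated objective: idiomatic
-- what changed: B actually sorts the list and collects the positions of the target by an enumerate scan, instead of A's counting pass that never sorts and synthesizes the index range arithmetically.
import Mathlib
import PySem

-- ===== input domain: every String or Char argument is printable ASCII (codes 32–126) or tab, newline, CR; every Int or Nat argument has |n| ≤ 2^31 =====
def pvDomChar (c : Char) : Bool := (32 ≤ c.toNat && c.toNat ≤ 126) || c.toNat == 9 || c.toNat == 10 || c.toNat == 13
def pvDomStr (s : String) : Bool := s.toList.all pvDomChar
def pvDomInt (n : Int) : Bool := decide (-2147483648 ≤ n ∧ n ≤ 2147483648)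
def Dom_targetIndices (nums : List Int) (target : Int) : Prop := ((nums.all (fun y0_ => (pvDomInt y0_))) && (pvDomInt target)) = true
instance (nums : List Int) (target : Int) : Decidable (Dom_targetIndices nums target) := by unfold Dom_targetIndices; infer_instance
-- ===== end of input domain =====

-- B sorts the list and collects the positions of the target by an enumerate scan,
-- instead of A's counting pass that synthesizes the index range arithmetically (idiomatic; not faster).

-- ===== PORT A =====
def targetIndices (nums : List Int) (target : Int) : List Int :=
  let st := (PySem.List.pyRange 0 (PySem.List.len nums) 1).foldl
    (fun (st : Int × Int) i =>
      if PySem.List.pyGetD nums i 0 < target then (st.1 + 1, st.2)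
      else if PySem.List.pyGetD nums i 0 == target then (st.1, st.2 + 1)
      else st)
    (0, 0)
  PySem.List.pyRange st.1 (st.1 + st.2) 1

-- ===== PORT B =====
def targetIndices_alt (nums : List Int) (target : Int) : List Int :=
  let s := PySem.List.sorted nums (fun x => x) false
  ((PySem.List.enumerate s 0).filter (fun p => p.2 == target)).map (fun p => p.1)

-- ===== PRECONDITION & SPEC =====
def Spec_targetIndices (nums : List Int) (target : Int) (out : List Int) : Prop := out = targetIndices_alt nums target
instance (nums : List Int) (target : Int) (out : List Int) : Decidable (Spec_targetIndices nums target out) := by unfold Spec_targetIndices; infer_instance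

-- ===== CLAIM (what is proved, stated in full; the proofs are below) =====
def Claim_equal_targetIndices : Prop := ∀ (nums : List Int) (target : Int), Dom_targetIndices nums target → Spec_targetIndices nums target (targetIndices nums target)

-- ===== LEMMAS AND PROOFS =====

-- A's counting fold computes (number of elements < target, number of elements = target).
theorem countFold_eq (t : Int) (xs : List Int) (a b : Int) :
    xs.foldl (fun (st : Int × Int) v =>
      if v < t then (st.1 + 1, st.2)
      else if v == t then (st.1, st.2 + 1)
      else st) (a, b)
    = (a + (xs.countP (fun v => v < t) : Int), b + (xs.count t : Int)) := by
  induction xs generalizing a b with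
  | nil => simp
  | cons x xs ih =>
    rw [List.foldl_cons]
    by_cases hlt : x < t
    · have hne : x ≠ t := by omega
      rw [if_pos hlt, ih]
      have h1 : (x :: xs).countP (fun v => v < t) = xs.countP (fun v => v < t) + 1 := by
        simp [List.countP_cons, hlt]
      have h2 : (x :: xs).count t = xs.count t := by
        simp [List.count_cons, hne]
      rw [h1, h2, Prod.mk.injEq]
      constructor <;> push_cast <;> ring
    · by_cases heq : x = t
      · rw [if_neg hlt, if_pos (by simp [heq]), ih]
        have h1 : (x :: xs).countP (fun v => v < t) = xs.countP (fun v => v < t) := by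
          simp [List.countP_cons, hlt]
        have h2 : (x :: xs).count t = xs.count t + 1 := by
          simp [List.count_cons, heq]
        rw [h1, h2, Prod.mk.injEq]
        constructor <;> push_cast <;> ring
      · rw [if_neg hlt, if_neg (by simp [heq]), ih]
        have h1 : (x :: xs).countP (fun v => v < t) = xs.countP (fun v => v < t) := by
          simp [List.countP_cons, hlt]
        have h2 : (x :: xs).count t = xs.count t := by
          simp [List.count_cons, heq]
        rw [h1, h2]

-- On a nondecreasing list, the indices (from offset k) holding t form the
-- contiguous range starting right after the elements below t.
theorem block_lemma (t : Int) (s : List Int) (k : Int)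
    (h : s.Pairwise (fun a b => a ≤ b)) :
    ((PySem.List.enumerate s k).filter (fun p => p.2 == t)).map (fun p => p.1)
    = PySem.List.pyRange (k + (s.countP (fun v => v < t) : Int))
        (k + (s.countP (fun v => v < t) : Int) + (s.count t : Int)) 1 := by
  induction s generalizing k with
  | nil => simp [PySem.List.enumerate_nil, PySem.List.pyRange_one_eq_nil]
  | cons x xs ih =>
    rcases List.pairwise_cons.mp h with ⟨hx, hxs⟩
    rw [PySem.List.enumerate_cons, List.filter_cons]
    by_cases hlt : x < t
    · have hne : x ≠ t := by omega
      rw [if_neg (by simp [hne]), ih (k + 1) hxs]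
      have h1 : (x :: xs).countP (fun v => v < t) = xs.countP (fun v => v < t) + 1 := by
        simp [List.countP_cons, hlt]
      have h2 : (x :: xs).count t = xs.count t := by
        simp [List.count_cons, hne]
      rw [h1, h2]
      congr 1 <;> push_cast <;> ring
    · by_cases heq : x = t
      · -- every later element is ≥ x = t, so no later element is < t
        have hc0 : xs.countP (fun v => v < t) = 0 := by
          rw [List.countP_eq_zero]
          intro y hy
          have := hx y hy
          simp; omega
        have h1 : (x :: xs).countP (fun v => v < t) = 0 := by
          simp [List.countP_cons, hlt, hc0]
        have h2 : (x :: xs).count t = xs.count t + 1 := by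
          simp [List.count_cons, heq]
        rw [if_pos (by simp [heq]), List.map_cons, ih (k + 1) hxs, hc0, h1, h2]
        push_cast
        ring_nf
        have hnn : (0 : Int) ≤ (xs.count t : Int) := Int.natCast_nonneg _
        conv_rhs => rw [PySem.List.pyRange_one_cons (by omega)]
        ring_nf
      · -- x > t : every later element is ≥ x > t, so the tail holds neither t nor less
        have hgt : t < x := by omega
        have hc0 : xs.countP (fun v => v < t) = 0 := by
          rw [List.countP_eq_zero]
          intro y hy
          have := hx y hy
          simp; omega
        have he0 : xs.count t = 0 := by
          rw [List.count_eq_zero]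
          intro hy
          have := hx t hy
          omega
        have h1 : (x :: xs).countP (fun v => v < t) = 0 := by
          simp [List.countP_cons, hlt, hc0]
        have h2 : (x :: xs).count t = 0 := by
          simp [List.count_cons, heq, he0]
        rw [if_neg (by simp [heq]), ih (k + 1) hxs, hc0, he0, h1, h2]
        simp [PySem.List.pyRange_one_eq_nil]

-- ===== VERDICT (by name: the statement is the Claim_ definition above) =====
theorem targetIndices_spec : Claim_equal_targetIndices := by
  intro nums target _
  unfold Spec_targetIndices targetIndices_alt
  have hs := PySem.List.sorted_perm nums (fun x : Int => x) false
  have hpw : (PySem.List.sorted nums (fun x : Int => x) false).Pairwise (fun a b => a ≤ b) :=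
    PySem.List.sorted_pairwise nums (fun x : Int => x)
  rw [block_lemma target _ 0 hpw]
  simp only [targetIndices, PySem.List.len_eq]
  rw [PySem.List.foldl_pyRange_zero_pyGetD' nums 0
    (fun (st : Int × Int) v =>
      if v < target then (st.1 + 1, st.2)
      else if v == target then (st.1, st.2 + 1)
      else st) (0, 0)]
  rw [countFold_eq]
  simp only [hs.countP_eq, hs.count_eq]
  congr 1 <;> push_cast <;> ring
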